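-- pv_equiv track=rewrite | github.com/Luthiraa/Go-Fish | server/src/utils/extract.py | match_keywords_to_services
-- ===== SOURCE A (Python) =====
-- from collections import Counter
--
-- def match_keywords_to_services(keywords, additional_keywords):
--     services = {
--         'github': [
--             'repository', 'commit', 'pull request', 'issue', 'code', 'branch', 'merge', 'fork', 'clone', 'release',
--             'tag', 'gist', 'contributor', 'collaborator', 'webhook', 'actions', 'workflow', 'milestone', 'label'
--         ],
--         'slack': [
--             'channel', 'message', 'workspace', 'bot', 'integration', 'thread', 'mention', 'reaction', 'emoji',
--             'direct message', 'group', 'call', 'video', 'file', 'upload', 'notification', 'status', 'away', 'online'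
--         ],
--         'stack overflow': [
--             'question', 'answer', 'tag', 'vote', 'reputation', 'comment', 'badge', 'profile', 'edit', 'flag',
--             'close', 'duplicate', 'accepted', 'bounty', 'view', 'upvote', 'downvote', 'favorite', 'bookmark'
--         ],
--         'reddit': [
--             'subreddit', 'post', 'comment', 'upvote', 'downvote', 'karma', 'award', 'flair', 'thread', 'mod',
--             'moderator', 'spoiler', 'crosspost', 'link', 'image', 'video', 'poll', 'discussion'
--         ]
--     }
--
--     keyword_counter = Counter(keywords)
--     service_scores = {service: 0 for service in services}
--
--     for service, service_keywords in services.items():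
--         for keyword in service_keywords:
--             if keyword in keyword_counter:
--                 service_scores[service] += keyword_counter[keyword]
--         for keyword in additional_keywords.get(service, []):
--             if keyword in keyword_counter:
--                 service_scores[service] += keyword_counter[keyword]
--
--     sorted_services = sorted(service_scores.items(), key=lambda item: item[1], reverse=True)
--     matched_services = [service for service, score in sorted_services if score > 0]
--
--     return matched_services
-- ===== SOURCE B (Python) =====
-- from collections import Counter
--
-- def match_keywords_to_services(keywords, additional_keywords):
--     services = {
--         'github': [
--             'repository', 'commit', 'pull request', 'issue', 'code', 'branch', 'merge', 'fork', 'clone', 'release',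
--             'tag', 'gist', 'contributor', 'collaborator', 'webhook', 'actions', 'workflow', 'milestone', 'label'
--         ],
--         'slack': [
--             'channel', 'message', 'workspace', 'bot', 'integration', 'thread', 'mention', 'reaction', 'emoji',
--             'direct message', 'group', 'call', 'video', 'file', 'upload', 'notification', 'status', 'away', 'online'
--         ],
--         'stack overflow': [
--             'question', 'answer', 'tag', 'vote', 'reputation', 'comment', 'badge', 'profile', 'edit', 'flag',
--             'close', 'duplicate', 'accepted', 'bounty', 'view', 'upvote', 'downvote', 'favorite', 'bookmark'
--         ],
--         'reddit': [
--             'subreddit', 'post', 'comment', 'upvote', 'downvote', 'karma', 'award', 'flair', 'thread', 'mod',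
--             'moderator', 'spoiler', 'crosspost', 'link', 'image', 'video', 'poll', 'discussion'
--         ]
--     }
--     # Inverted index: each keyword maps to the services that list it, once per
--     # occurrence (a list, not a set, so duplicated keywords still count twice).
--     index = {}
--     for service, service_keywords in services.items():
--         for kw in service_keywords + additional_keywords.get(service, []):
--             index.setdefault(kw, []).append(service)
--
--     scores = {service: 0 for service in services}
--     for kw, cnt in Counter(keywords).items():
--         for service in index.get(kw, []):
--             scores[service] += cnt
--
--     ranked = sorted(scores.items(), key=lambda item: item[1], reverse=True)
--     return [service for service, score in ranked if score > 0]
-- ===== Notes on version B (the rewrite author's own statement) =====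
-- stated objective: alternative
-- what changed: B replaces A's per-service scan of every keyword list against the Counter by an inverted index (keyword -> list of services, with multiplicity) built once, then a single pass over Counter(keywords).items() that adds each count through the index; sort and filter are unchanged.
import Mathlib
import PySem

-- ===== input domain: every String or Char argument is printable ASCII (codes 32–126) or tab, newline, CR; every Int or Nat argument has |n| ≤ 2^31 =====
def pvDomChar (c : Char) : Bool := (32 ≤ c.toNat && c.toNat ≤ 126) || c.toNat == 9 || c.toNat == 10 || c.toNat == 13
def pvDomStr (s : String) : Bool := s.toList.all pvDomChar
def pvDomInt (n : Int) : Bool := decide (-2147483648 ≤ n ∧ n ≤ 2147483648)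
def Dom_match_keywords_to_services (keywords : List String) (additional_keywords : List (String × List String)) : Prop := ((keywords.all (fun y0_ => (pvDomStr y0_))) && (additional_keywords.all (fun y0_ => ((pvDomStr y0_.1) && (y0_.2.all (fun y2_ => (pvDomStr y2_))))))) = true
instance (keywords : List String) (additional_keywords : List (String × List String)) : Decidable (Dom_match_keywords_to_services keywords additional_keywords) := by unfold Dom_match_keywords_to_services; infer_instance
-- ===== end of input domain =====

-- B replaces A's per-service scan of every keyword list against the Counter by an inverted
-- index (keyword -> services, with multiplicity) built once, then one pass over the Counter's
-- items adding each count through the index; alternative data structure, same results.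

-- the literal `services` table both Pythons start from
def pvServices : List (String × List String) := [
  ("github", ["repository", "commit", "pull request", "issue", "code", "branch", "merge", "fork", "clone", "release",
      "tag", "gist", "contributor", "collaborator", "webhook", "actions", "workflow", "milestone", "label"]),
  ("slack", ["channel", "message", "workspace", "bot", "integration", "thread", "mention", "reaction", "emoji",
      "direct message", "group", "call", "video", "file", "upload", "notification", "status", "away", "online"]),
  ("stack overflow", ["question", "answer", "tag", "vote", "reputation", "comment", "badge", "profile", "edit", "flag",
      "close", "duplicate", "accepted", "bounty", "view", "upvote", "downvote", "favorite", "bookmark"]),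
  ("reddit", ["subreddit", "post", "comment", "upvote", "downvote", "karma", "award", "flair", "thread", "mod",
      "moderator", "spoiler", "crosspost", "link", "image", "video", "poll", "discussion"])]

-- ===== PORT A =====
-- A's inner loop `for keyword in kws: if keyword in keyword_counter: service_scores[service] += keyword_counter[keyword]`
def pvALoop (keyword_counter : PySem.Dict String Int) (service : String)
    (service_scores : PySem.Dict String Int) (kws : List String) : PySem.Dict String Int :=
  kws.foldl (fun d kw => if keyword_counter.contains kw then d.modify service 0 (fun v => v + keyword_counter.getD kw 0) else d) service_scores

def match_keywords_to_services (keywords : List String) (additional_keywords : List (String × List String)) : List String :=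
  let services := pvServices
  let keyword_counter := PySem.Dict.counter keywords
  let service_scores := services.foldl (fun d p => d.insert p.1 (0 : Int)) PySem.Dict.empty
  let service_scores := services.foldl (fun d p =>
      pvALoop keyword_counter p.1 (pvALoop keyword_counter p.1 d p.2)
        ((PySem.Dict.mk additional_keywords).getD p.1 [])) service_scores
  let sorted_services := PySem.List.sorted service_scores.items (fun item => item.2) true
  (sorted_services.filter (fun p => decide (p.2 > 0))).map (fun p => p.1)

-- ===== PORT B =====
-- `for kw in service_keywords + additional_keywords.get(service, []): index.setdefault(kw, []).append(service)`
def pvIndexService (idx : PySem.Dict String (List String)) (service : String) (kws : List String) :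
    PySem.Dict String (List String) :=
  kws.foldl (fun idx kw => idx.modify kw [] (fun svcs => svcs ++ [service])) idx

-- `for service in index.get(kw, []): scores[service] += cnt`
def pvBumpScores (scores : PySem.Dict String Int) (cnt : Int) (svcs : List String) : PySem.Dict String Int :=
  svcs.foldl (fun sc service => sc.modify service 0 (fun v => v + cnt)) scores

def match_keywords_to_services_alt (keywords : List String) (additional_keywords : List (String × List String)) : List String :=
  let index := pvServices.foldl (fun idx p =>
      pvIndexService idx p.1 (p.2 ++ (PySem.Dict.mk additional_keywords).getD p.1 [])) PySem.Dict.empty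
  let scores0 := pvServices.foldl (fun sc p => sc.insert p.1 (0 : Int)) PySem.Dict.empty
  let scores := (PySem.Dict.counter keywords).items.foldl
      (fun sc q => pvBumpScores sc q.2 (index.getD q.1 [])) scores0
  let ranked := PySem.List.sorted scores.items (fun item => item.2) true
  (ranked.filter (fun p => decide (p.2 > 0))).map (fun p => p.1)

-- ===== PRECONDITION & SPEC =====
def Spec_match_keywords_to_services (keywords : List String) (additional_keywords : List (String × List String)) (out : List String) : Prop := out = match_keywords_to_services_alt keywords additional_keywords
instance (keywords : List String) (additional_keywords : List (String × List String)) (out : List String) : Decidable (Spec_match_keywords_to_services keywords additional_keywords out) := by unfold Spec_match_keywords_to_services; infer_instance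

-- ===== CLAIM (what is proved, stated in full; the proofs are below) =====
def Claim_equal_match_keywords_to_services : Prop := ∀ (keywords : List String) (additional_keywords : List (String × List String)), Dom_match_keywords_to_services keywords additional_keywords → Spec_match_keywords_to_services keywords additional_keywords (match_keywords_to_services keywords additional_keywords)

-- ===== LEMMAS AND PROOFS =====

-- A's score contribution of one keyword list against the counter
def pvScore (c : PySem.Dict String Int) (kws : List String) : Int :=
  (kws.map (fun kw => if c.contains kw then c.getD kw 0 else 0)).sum

theorem pvALoop_getD (c : PySem.Dict String Int) (s k : String) (kws : List String)
    (d : PySem.Dict String Int) :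
    (pvALoop c s d kws).getD k 0 = d.getD k 0 + (if k = s then pvScore c kws else 0) := by
  induction kws generalizing d with
  | nil => simp [pvALoop, pvScore]
  | cons kw rest ih =>
    simp only [pvALoop, List.foldl_cons] at ih ⊢
    rw [ih]
    by_cases hc : c.contains kw = true
    · simp only [hc, if_true, PySem.Dict.getD_modify, pvScore, List.map_cons, List.sum_cons]
      by_cases hk : k = s
      · simp [hk]; ring
      · simp [hk]
    · simp only [hc, if_false, pvScore, List.map_cons, List.sum_cons, Bool.false_eq_true]
      by_cases hk : k = s <;> simp [hk]

theorem pvALoop_keys (c : PySem.Dict String Int) (s : String) (kws : List String)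
    (d : PySem.Dict String Int) (h : s ∈ d.keys) :
    (pvALoop c s d kws).keys = d.keys := by
  induction kws generalizing d with
  | nil => rfl
  | cons kw rest ih =>
    simp only [pvALoop, List.foldl_cons] at ih ⊢
    by_cases hc : c.contains kw = true
    · simp only [hc, if_true]
      have hcs : d.contains s = true := (PySem.Dict.contains_iff_mem_keys d s).mpr h
      have hk : (d.modify s 0 (fun v => v + c.getD kw 0)).keys = d.keys := by
        rw [PySem.Dict.keys_modify, PySem.Dict.keys_insert_of_contains d _ hcs]
      rw [ih _ (by rw [hk]; exact h), hk]
    · simp only [hc, Bool.false_eq_true, if_false]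
      exact ih d h

theorem pvScore_counter (ws kws : List String) :
    pvScore (PySem.Dict.counter ws) kws = (kws.map (fun kw => (List.count kw ws : Int))).sum := by
  unfold pvScore
  congr 1
  refine List.map_congr_left (fun kw _ => ?_)
  rw [PySem.Dict.contains_counter, PySem.Dict.getD_counter]
  by_cases h : kw ∈ ws
  · simp [h]
  · simp [h, List.count_eq_zero.mpr h]

theorem pvInit_keys (tbl : List (String × List String)) (d : PySem.Dict String Int)
    (h : ∀ p ∈ tbl, d.contains p.1 = false) (hnd : (tbl.map Prod.fst).Nodup) :
    (tbl.foldl (fun d p => d.insert p.1 (0 : Int)) d).keys = d.keys ++ tbl.map Prod.fst := by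
  induction tbl generalizing d with
  | nil => simp
  | cons q rest ih =>
    simp only [List.foldl_cons, List.map_cons] at hnd ⊢
    rw [ih _ (fun p hp => ?_) (List.nodup_cons.mp hnd).2,
      PySem.Dict.keys_insert_of_not_contains d _ (h q (by simp))]
    · simp
    · have hne : (p.1 == q.1) = false := by
        have : p.1 ≠ q.1 := fun he => (List.nodup_cons.mp hnd).1 (he ▸ List.mem_map_of_mem (f := Prod.fst) hp)
        simpa using this
      rw [PySem.Dict.contains_insert, hne, Bool.false_or]
      exact h p (by simp [hp])

theorem pvInit_getD (tbl : List (String × List String)) (d : PySem.Dict String Int) (k : String) :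
    (tbl.foldl (fun d p => d.insert p.1 (0 : Int)) d).getD k 0
      = if k ∈ tbl.map Prod.fst then 0 else d.getD k 0 := by
  induction tbl generalizing d with
  | nil => simp
  | cons q rest ih =>
    simp only [List.foldl_cons, List.map_cons, List.mem_cons]
    rw [ih]
    by_cases hr : k ∈ rest.map Prod.fst
    · simp [hr]
    · by_cases hq : k = q.1 <;> simp [hr, hq, PySem.Dict.getD_insert]

theorem pvOuter_keys (c : PySem.Dict String Int) (ad : PySem.Dict String (List String))
    (tbl : List (String × List String)) (d : PySem.Dict String Int)
    (h : ∀ p ∈ tbl, p.1 ∈ d.keys) :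
    (tbl.foldl (fun d p => pvALoop c p.1 (pvALoop c p.1 d p.2) (ad.getD p.1 [])) d).keys = d.keys := by
  induction tbl generalizing d with
  | nil => rfl
  | cons q rest ih =>
    simp only [List.foldl_cons]
    have h1 : (pvALoop c q.1 d q.2).keys = d.keys := pvALoop_keys _ _ _ _ (h q (by simp))
    have h2 : (pvALoop c q.1 (pvALoop c q.1 d q.2) (ad.getD q.1 [])).keys = d.keys := by
      rw [pvALoop_keys _ _ _ _ (by rw [h1]; exact h q (by simp)), h1]
    rw [ih _ (fun p hp => by rw [h2]; exact h p (by simp [hp])), h2]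

theorem pvOuter_getD (c : PySem.Dict String Int) (ad : PySem.Dict String (List String))
    (tbl : List (String × List String)) (d : PySem.Dict String Int) (k : String) :
    (tbl.foldl (fun d p => pvALoop c p.1 (pvALoop c p.1 d p.2) (ad.getD p.1 [])) d).getD k 0
      = d.getD k 0 + (tbl.map (fun p => if k = p.1 then pvScore c p.2 + pvScore c (ad.getD p.1 []) else 0)).sum := by
  induction tbl generalizing d with
  | nil => simp
  | cons q rest ih =>
    simp only [List.foldl_cons, List.map_cons, List.sum_cons]
    rw [ih, pvALoop_getD, pvALoop_getD]
    by_cases hq : k = q.1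
    · simp [hq]; ring
    · simp [hq]

theorem pvSum_unique (tbl : List (String × List String)) (f : String × List String → Int)
    (hnd : (tbl.map Prod.fst).Nodup) (p : String × List String) (hp : p ∈ tbl) :
    (tbl.map (fun q => if p.1 = q.1 then f q else 0)).sum = f p := by
  induction tbl with
  | nil => simp at hp
  | cons q rest ih =>
    simp only [List.map_cons, List.sum_cons, List.map_cons] at hnd ⊢
    rcases List.mem_cons.mp hp with hpq | hpr
    · subst hpq
      have hz : (rest.map (fun q => if p.1 = q.1 then f q else 0)).sum = 0 := by
        have hni : p.1 ∉ rest.map Prod.fst := (List.nodup_cons.mp hnd).1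
        rw [List.sum_eq_zero]
        intro x hx
        obtain ⟨r, hr, rfl⟩ := List.mem_map.mp hx
        have : p.1 ≠ r.1 := fun he => hni (he ▸ List.mem_map_of_mem (f := Prod.fst) hr)
        simp [this]
      simp [hz]
    · have hne : p.1 ≠ q.1 := by
        intro he
        exact (List.nodup_cons.mp hnd).1 (he ▸ List.mem_map_of_mem (f := Prod.fst) hpr)
      rw [if_neg hne, ih (List.nodup_cons.mp hnd).2 hpr]
      ring

theorem pvItems_final (c : PySem.Dict String Int) (ad : PySem.Dict String (List String))
    (tbl : List (String × List String)) (hnd : (tbl.map Prod.fst).Nodup) :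
    (tbl.foldl (fun d p => pvALoop c p.1 (pvALoop c p.1 d p.2) (ad.getD p.1 []))
        (tbl.foldl (fun d p => d.insert p.1 (0 : Int)) PySem.Dict.empty)).items
      = tbl.map (fun p => (p.1, pvScore c p.2 + pvScore c (ad.getD p.1 []))) := by
  have h0keys : (tbl.foldl (fun d p => d.insert p.1 (0 : Int)) PySem.Dict.empty).keys = tbl.map Prod.fst := by
    rw [pvInit_keys _ _ (fun p _ => PySem.Dict.contains_empty _) hnd]
    simp
  have hkeys : (tbl.foldl (fun d p => pvALoop c p.1 (pvALoop c p.1 d p.2) (ad.getD p.1 []))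
      (tbl.foldl (fun d p => d.insert p.1 (0 : Int)) PySem.Dict.empty)).keys = tbl.map Prod.fst := by
    rw [pvOuter_keys _ _ _ _ (fun p hp => by rw [h0keys]; exact List.mem_map_of_mem hp), h0keys]
  rw [PySem.Dict.items_eq_map_keys _ (by rw [hkeys]; exact hnd) 0, hkeys, List.map_map]
  refine List.map_congr_left (fun p hp => ?_)
  simp only [Function.comp_apply]
  rw [pvOuter_getD, pvInit_getD, if_pos (List.mem_map_of_mem hp),
    pvSum_unique tbl _ hnd p hp, zero_add]

-- ---- B-side lemmas: the inverted index and the counter pass ----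

-- one service's pass over its combined keyword list appends it count-many times per keyword
theorem pvIndexService_getD (s k : String) (kws : List String) (d : PySem.Dict String (List String)) :
    (pvIndexService d s kws).getD k [] = d.getD k [] ++ List.replicate (kws.count k) s := by
  induction kws generalizing d with
  | nil => simp [pvIndexService]
  | cons kw rest ih =>
    simp only [pvIndexService, List.foldl_cons] at ih ⊢
    rw [ih, PySem.Dict.getD_modify, List.count_cons]
    by_cases hk : k = kw
    · simp only [hk, if_true, beq_self_eq_true, List.append_assoc, List.singleton_append]
      rw [← List.replicate_succ, List.replicate_succ']
    · have : (kw == k) = false := by simpa using fun h => hk h.symm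
      simp [hk, this]

-- the whole index: index[k] lists each service once per occurrence of k, in table order
theorem pvIndex_getD (ad : PySem.Dict String (List String)) (tbl : List (String × List String))
    (d : PySem.Dict String (List String)) (k : String) :
    (tbl.foldl (fun idx p => pvIndexService idx p.1 (p.2 ++ ad.getD p.1 [])) d).getD k []
      = d.getD k [] ++ tbl.flatMap (fun p => List.replicate ((p.2 ++ ad.getD p.1 []).count k) p.1) := by
  induction tbl generalizing d with
  | nil => simp
  | cons q rest ih =>
    simp only [List.foldl_cons, List.flatMap_cons]
    rw [ih, pvIndexService_getD, List.append_assoc]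

-- bumping through one index list adds cnt per occurrence of the service
theorem pvBumpScores_getD (cnt : Int) (svcs : List String) (sc : PySem.Dict String Int) (s : String) :
    (pvBumpScores sc cnt svcs).getD s 0 = sc.getD s 0 + (svcs.count s : Int) * cnt := by
  induction svcs generalizing sc with
  | nil => simp [pvBumpScores]
  | cons v rest ih =>
    simp only [pvBumpScores, List.foldl_cons] at ih ⊢
    rw [ih, PySem.Dict.getD_modify, List.count_cons]
    by_cases hs : s = v
    · simp [hs]; ring
    · have : (v == s) = false := by simpa using fun h => hs h.symm
      simp [hs, this]

theorem pvBumpScores_keys (cnt : Int) (svcs : List String) (sc : PySem.Dict String Int)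
    (h : ∀ s ∈ svcs, s ∈ sc.keys) :
    (pvBumpScores sc cnt svcs).keys = sc.keys := by
  induction svcs generalizing sc with
  | nil => rfl
  | cons v rest ih =>
    simp only [pvBumpScores, List.foldl_cons] at ih ⊢
    have hcv : sc.contains v = true := (PySem.Dict.contains_iff_mem_keys sc v).mpr (h v (by simp))
    have hk : (sc.modify v 0 (fun x => x + cnt)).keys = sc.keys := by
      rw [PySem.Dict.keys_modify, PySem.Dict.keys_insert_of_contains sc _ hcv]
    rw [ih _ (fun s hs => by rw [hk]; exact h s (by simp [hs])), hk]

-- the counter pass: each (kw, cnt) item adds cnt * (occurrences of s in index[kw])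
theorem pvPass_getD (index : PySem.Dict String (List String)) (its : List (String × Int))
    (sc : PySem.Dict String Int) (s : String) :
    (its.foldl (fun sc q => pvBumpScores sc q.2 (index.getD q.1 [])) sc).getD s 0
      = sc.getD s 0 + (its.map (fun q => ((index.getD q.1 []).count s : Int) * q.2)).sum := by
  induction its generalizing sc with
  | nil => simp
  | cons q rest ih =>
    simp only [List.foldl_cons, List.map_cons, List.sum_cons]
    rw [ih, pvBumpScores_getD]
    ring

theorem pvPass_keys (index : PySem.Dict String (List String)) (its : List (String × Int))
    (sc : PySem.Dict String Int) (h : ∀ kw, ∀ s ∈ index.getD kw [], s ∈ sc.keys) :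
    (its.foldl (fun sc q => pvBumpScores sc q.2 (index.getD q.1 [])) sc).keys = sc.keys := by
  induction its generalizing sc with
  | nil => rfl
  | cons q rest ih =>
    simp only [List.foldl_cons]
    have hk : (pvBumpScores sc q.2 (index.getD q.1 [])).keys = sc.keys :=
      pvBumpScores_keys _ _ _ (h q.1)
    rw [ih _ (fun kw s hs => by rw [hk]; exact h kw s hs), hk]

-- count of a distinct service in the flattened index entry is its own keyword-list count
theorem pvCount_flatMap (tbl : List (String × List String)) (g : String × List String → Nat)
    (hnd : (tbl.map Prod.fst).Nodup) (p : String × List String) (hp : p ∈ tbl) :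
    (tbl.flatMap (fun q => List.replicate (g q) q.1)).count p.1 = g p := by
  induction tbl with
  | nil => simp at hp
  | cons q rest ih =>
    simp only [List.flatMap_cons, List.count_append, List.map_cons] at hnd ⊢
    rcases List.mem_cons.mp hp with hpq | hpr
    · subst hpq
      have hz : (rest.flatMap (fun q => List.replicate (g q) q.1)).count p.1 = 0 := by
        rw [List.count_eq_zero]
        intro hmem
        obtain ⟨r, hr, hmr⟩ := List.mem_flatMap.mp hmem
        exact (List.nodup_cons.mp hnd).1
          ((List.eq_of_mem_replicate hmr) ▸ List.mem_map_of_mem (f := Prod.fst) hr)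
      simp [hz]
    · have hne : p.1 ≠ q.1 := fun he =>
        (List.nodup_cons.mp hnd).1 (he ▸ List.mem_map_of_mem (f := Prod.fst) hpr)
      rw [ih (List.nodup_cons.mp hnd).2 hpr, List.count_replicate,
        if_neg (by simpa using fun h => hne (Eq.symm h))]
      omega

-- summing an if-filter over a Nodup list picks the one element (Nat-count version on keywords)
theorem pvSum_pick (S : List String) (c : String → Int) (w : String) (hnd : S.Nodup) :
    (S.map (fun kw => if kw = w then c kw else 0)).sum = if w ∈ S then c w else 0 := by
  induction S with
  | nil => simp
  | cons x rest ih =>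
    simp only [List.map_cons, List.sum_cons, List.mem_cons]
    rcases List.nodup_cons.mp hnd with ⟨hx, hr⟩
    by_cases hxw : x = w
    · subst hxw
      simp [ih hr, hx]
    · rw [if_neg hxw, ih hr, zero_add]
      have hwx : w ≠ x := fun h => hxw (Eq.symm h)
      by_cases hw : w ∈ rest <;> simp [hw, hwx]

-- double counting: Σ_{distinct kw of ws} count kw comb * count kw ws = Σ_{w ∈ comb} count w ws
theorem pvIndex_sum (ws comb : List String) :
    ((PySem.Set.ofList ws).map (fun kw => ((comb.count kw : Int)) * ((ws.count kw : Int)))).sum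
      = (comb.map (fun w => (ws.count w : Int))).sum := by
  induction comb with
  | nil => simp
  | cons w t ih =>
    simp only [List.map_cons, List.sum_cons]
    have hsplit : ((PySem.Set.ofList ws).map (fun kw => (((w :: t).count kw : Int)) * (ws.count kw : Int))).sum
        = ((PySem.Set.ofList ws).map (fun kw => ((t.count kw : Int)) * (ws.count kw : Int))).sum
          + ((PySem.Set.ofList ws).map (fun kw => if kw = w then (ws.count kw : Int) else 0)).sum := by
      rw [← PySem.List.sum_map_add_int]
      refine congrArg List.sum (List.map_congr_left (fun kw _ => ?_))
      rw [List.count_cons]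
      by_cases h : kw = w
      · simp [h]; ring
      · have hne : (w == kw) = false := by simpa using fun he => h he.symm
        rw [hne, if_neg h]
        simp
    rw [hsplit, ih, pvSum_pick _ _ _ (PySem.Set.nodup_ofList ws)]
    have : (if w ∈ PySem.Set.ofList ws then ((ws.count w : Int)) else 0) = (ws.count w : Int) := by
      by_cases hw : w ∈ ws
      · rw [if_pos ((PySem.Set.mem_ofList ws w).mpr hw)]
      · rw [if_neg (fun h => hw ((PySem.Set.mem_ofList ws w).mp h)), List.count_eq_zero.mpr hw]
        simp
    rw [this]; ring

-- every service appearing in an index entry is a first component of the table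
theorem pvIndex_mem (ad : PySem.Dict String (List String)) (tbl : List (String × List String))
    (kw s : String)
    (hs : s ∈ (tbl.foldl (fun idx p => pvIndexService idx p.1 (p.2 ++ ad.getD p.1 [])) PySem.Dict.empty).getD kw []) :
    s ∈ tbl.map Prod.fst := by
  rw [pvIndex_getD] at hs
  simp only [PySem.Dict.getD_empty, List.nil_append] at hs
  obtain ⟨p, hp, hmem⟩ := List.mem_flatMap.mp hs
  exact (List.eq_of_mem_replicate hmem) ▸ List.mem_map_of_mem (f := Prod.fst) hp

-- B's final items list, in closed form
theorem pvItemsB_final (keywords : List String) (ad : PySem.Dict String (List String))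
    (tbl : List (String × List String)) (hnd : (tbl.map Prod.fst).Nodup) :
    ((PySem.Dict.counter keywords).items.foldl
        (fun sc q => pvBumpScores sc q.2
          ((tbl.foldl (fun idx p => pvIndexService idx p.1 (p.2 ++ ad.getD p.1 [])) PySem.Dict.empty).getD q.1 []))
        (tbl.foldl (fun d p => d.insert p.1 (0 : Int)) PySem.Dict.empty)).items
      = tbl.map (fun p => (p.1, ((p.2 ++ ad.getD p.1 []).map (fun w => (keywords.count w : Int))).sum)) := by
  have h0keys : (tbl.foldl (fun d p => d.insert p.1 (0 : Int)) PySem.Dict.empty).keys = tbl.map Prod.fst := by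
    rw [pvInit_keys _ _ (fun p _ => PySem.Dict.contains_empty _) hnd]
    simp
  have hkeys : ((PySem.Dict.counter keywords).items.foldl
      (fun sc q => pvBumpScores sc q.2
        ((tbl.foldl (fun idx p => pvIndexService idx p.1 (p.2 ++ ad.getD p.1 [])) PySem.Dict.empty).getD q.1 []))
      (tbl.foldl (fun d p => d.insert p.1 (0 : Int)) PySem.Dict.empty)).keys = tbl.map Prod.fst := by
    rw [pvPass_keys _ _ _ (fun kw s hs => by rw [h0keys]; exact pvIndex_mem ad tbl kw s hs), h0keys]
  rw [PySem.Dict.items_eq_map_keys _ (by rw [hkeys]; exact hnd) 0, hkeys, List.map_map]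
  refine List.map_congr_left (fun p hp => ?_)
  simp only [Function.comp_apply]
  rw [pvPass_getD, pvInit_getD, if_pos (List.mem_map_of_mem hp), PySem.Dict.items_counter]
  congr 1
  have hmap : ((PySem.Set.ofList keywords).map (fun k => (k, (keywords.count k : Int)))).map
        (fun q => ((((tbl.foldl (fun idx p => pvIndexService idx p.1 (p.2 ++ ad.getD p.1 [])) PySem.Dict.empty).getD q.1 []).count p.1 : Int)) * q.2)
      = (PySem.Set.ofList keywords).map
        (fun kw => (((p.2 ++ ad.getD p.1 []).count kw : Int)) * (keywords.count kw : Int)) := by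
    rw [List.map_map]
    refine List.map_congr_left (fun kw _ => ?_)
    simp only [Function.comp_apply]
    rw [pvIndex_getD]
    simp only [PySem.Dict.getD_empty, List.nil_append]
    rw [pvCount_flatMap tbl _ hnd p hp]
  rw [hmap, pvIndex_sum, zero_add]

theorem match_keywords_to_services_eq (keywords : List String)
    (additional_keywords : List (String × List String)) :
    match_keywords_to_services keywords additional_keywords
      = match_keywords_to_services_alt keywords additional_keywords := by
  simp only [match_keywords_to_services, match_keywords_to_services_alt]
  rw [pvItems_final (PySem.Dict.counter keywords) (PySem.Dict.mk additional_keywords) pvServices (by decide),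
    pvItemsB_final keywords (PySem.Dict.mk additional_keywords) pvServices (by decide)]
  have hmap : pvServices.map (fun p => (p.1,
        pvScore (PySem.Dict.counter keywords) p.2
          + pvScore (PySem.Dict.counter keywords) ((PySem.Dict.mk additional_keywords).getD p.1 [])))
      = pvServices.map (fun p => (p.1,
        ((p.2 ++ (PySem.Dict.mk additional_keywords).getD p.1 []).map (fun w => (keywords.count w : Int))).sum)) := by
    refine List.map_congr_left (fun p _ => ?_)
    rw [List.map_append, List.sum_append, pvScore_counter, pvScore_counter]
  rw [hmap]

-- ===== VERDICT (by name: the statement is the Claim_ definition above) =====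
theorem match_keywords_to_services_spec : Claim_equal_match_keywords_to_services := by
  intro keywords additional_keywords _
  exact match_keywords_to_services_eq keywords additional_keywords
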